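-- pv_equiv track=rewrite | github.com/ffavela/mset | mset_lib/miscellaneous.py | getMsetForm2
-- ===== SOURCE A (Python) =====
-- def getMsetForm2(L):
--     d={}
--     for e in L:
--         if e not in d:
--             d[e]=0
--         d[e]+=1
--     M=[ d[e]*[e] for e in d]
--     M.sort(key=len, reverse=True)
--     return M
-- ===== SOURCE B (Python) =====
-- def getMsetForm2(L):
--     counts = {}
--     for e in L:
--         counts[e] = counts.get(e, 0) + 1
--     if not counts:
--         return []
--     mx = max(counts.values())
--     buckets = {}
--     for e in counts:
--         c = counts[e]
--         buckets.setdefault(c, []).append(c * [e])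
--     out = []
--     for c in range(mx, 0, -1):
--         out.extend(buckets.get(c, []))
--     return out
-- ===== Notes on version B (the rewrite author's own statement) =====
-- stated objective: alternative
-- what changed: B replaces A's comparison sort of the groups (sort by len, reverse=True) with a counting/bucket pass: groups are dropped into buckets keyed by their frequency and the output is read from the highest frequency down, preserving first-encounter order within each bucket.
import Mathlib
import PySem

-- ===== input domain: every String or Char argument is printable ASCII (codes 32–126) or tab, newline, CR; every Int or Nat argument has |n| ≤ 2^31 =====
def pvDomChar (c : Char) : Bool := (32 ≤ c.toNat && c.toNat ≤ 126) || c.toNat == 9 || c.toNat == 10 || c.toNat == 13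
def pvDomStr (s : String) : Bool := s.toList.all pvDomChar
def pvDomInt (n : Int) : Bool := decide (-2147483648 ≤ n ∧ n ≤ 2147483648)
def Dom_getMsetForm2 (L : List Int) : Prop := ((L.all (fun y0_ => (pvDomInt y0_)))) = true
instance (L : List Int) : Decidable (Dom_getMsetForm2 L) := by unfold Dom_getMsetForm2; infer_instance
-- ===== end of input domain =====

-- B replaces A's comparison sort (sort groups by length, reverse) with a counting pass:
-- groups are dropped into frequency buckets and read out from the highest frequency down
-- (objective: alternative — a bucket/counting strategy instead of a comparison sort).

-- ===== PORT A =====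
def getMsetForm2 (L : List Int) : List (List Int) :=
  let d : PySem.Dict Int Int :=
    L.foldl (fun d e => (if d.contains e then d else d.insert e 0).modify e 0 (· + 1))
      PySem.Dict.empty
  let M : List (List Int) := d.keys.map (fun e => PySem.List.pyRepeat [e] (d.getD e 0))
  PySem.List.sorted M (fun g => (g.length : Int)) true

-- ===== PORT B =====
def getMsetForm2_alt (L : List Int) : List (List Int) :=
  let counts : PySem.Dict Int Int :=
    L.foldl (fun d e => d.insert e (d.getD e 0 + 1)) PySem.Dict.empty
  if counts.items = [] then []
  else
    let mx : Int := (PySem.List.max? counts.values (fun v => v)).getD 0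
    let buckets : PySem.Dict Int (List (List Int)) :=
      counts.keys.foldl
        (fun b e =>
          b.modify (counts.getD e 0) [] (· ++ [PySem.List.pyRepeat [e] (counts.getD e 0)]))
        PySem.Dict.empty
    (PySem.List.pyRange mx 0 (-1)).foldl (fun out c => out ++ buckets.getD c []) []

-- ===== PRECONDITION & SPEC =====
def Spec_getMsetForm2 (L : List Int) (out : List (List Int)) : Prop := out = getMsetForm2_alt L
instance (L : List Int) (out : List (List Int)) : Decidable (Spec_getMsetForm2 L out) := by unfold Spec_getMsetForm2; infer_instance

-- ===== CLAIM (what is proved, stated in full; the proofs are below) =====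
def Claim_equal_getMsetForm2 : Prop := ∀ (L : List Int), Dom_getMsetForm2 L → Spec_getMsetForm2 L (getMsetForm2 L)

-- ===== LEMMAS AND PROOFS =====

-- insertBy passes over a prefix none of whose elements x goes before
theorem insertBy_pass {α : Type} (before : α → α → Bool) (x : α) (ys zs : List α)
    (h : ∀ y ∈ ys, before x y = false) :
    PySem.List.insertBy before x (ys ++ zs) = ys ++ PySem.List.insertBy before x zs := by
  induction ys with
  | nil => simp
  | cons y ys ih =>
    have hy : before x y = false := h y (by simp)
    rw [List.cons_append]
    rw [show PySem.List.insertBy before x (y :: (ys ++ zs))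
        = y :: PySem.List.insertBy before x (ys ++ zs) from by
      simp [PySem.List.insertBy, hy]]
    rw [ih (fun y hy => h y (List.mem_cons_of_mem _ hy))]
    rfl

-- insertBy prepends when x goes before the head (or the list is empty)
theorem insertBy_front {α : Type} (before : α → α → Bool) (x : α) (zs : List α)
    (h : ∀ hd ∈ zs.head?, before x hd = true) :
    PySem.List.insertBy before x zs = x :: zs := by
  cases zs with
  | nil => simp [PySem.List.insertBy]
  | cons hd tl => simp [PySem.List.insertBy, h hd (by simp)]

-- inserting x into a descending bucket concatenation appends x at the end of its bucket
theorem bucket_insert {α : Type} (k : α → Int) (x : α) (cs : List Int) (G : Int → List α)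
    (hp : cs.Pairwise (· > ·))
    (hG : ∀ c ∈ cs, ∀ y ∈ G c, k y = c) (hx : k x ∈ cs) :
    PySem.List.insertBy (fun a b => decide (k b < k a)) x (cs.flatMap G)
      = cs.flatMap (fun c => if k x = c then G c ++ [x] else G c) := by
  induction cs with
  | nil => simp at hx
  | cons c cs ih =>
    rw [List.flatMap_cons, List.flatMap_cons]
    rcases List.pairwise_cons.mp hp with ⟨hgt, hp'⟩
    by_cases hxc : k x = c
    · rw [insertBy_pass _ _ _ _ (by
        intro y hy
        have hk := hG c (by simp) y hy
        simp [hk, hxc])]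
      rw [insertBy_front _ _ _ (by
        intro hd hhd
        have hmem : hd ∈ cs.flatMap G := List.mem_of_mem_head? hhd
        rcases List.mem_flatMap.mp hmem with ⟨c', hc', hyc⟩
        have hk : k hd = c' := hG c' (List.mem_cons_of_mem _ hc') hd hyc
        have hlt : c' < c := hgt c' hc'
        simp only [hk, hxc, decide_eq_true_eq]
        omega)]
      rw [if_pos hxc]
      have hrest : cs.flatMap (fun c' => if k x = c' then G c' ++ [x] else G c') = cs.flatMap G := by
        rw [List.flatMap_def, List.flatMap_def]
        congr 1
        apply List.map_congr_left
        intro c' hc'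
        have : c' < c := hgt c' hc'
        rw [if_neg (by omega)]
      rw [hrest]
      simp
    · have hx' : k x ∈ cs := by
        rcases List.mem_cons.mp hx with h | h
        · exact absurd h hxc
        · exact h
      rw [insertBy_pass _ _ _ _ (by
        intro y hy
        have hk := hG c (by simp) y hy
        have hlt : k x < c := hgt _ hx'
        simp only [hk, decide_eq_false_iff_not]
        omega)]
      rw [ih hp' (fun c' hc' => hG c' (List.mem_cons_of_mem _ hc')) hx', if_neg hxc]

-- the stable insertion sort (descending) equals the bucket concatenation
theorem foldl_buckets {α : Type} (k : α → Int) (cs : List Int) (hp : cs.Pairwise (· > ·))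
    (M : List α) (hM : ∀ g ∈ M, k g ∈ cs) :
    M.foldl (fun acc x => PySem.List.insertBy (fun a b => decide (k b < k a)) x acc) []
      = cs.flatMap (fun c => M.filter (fun g => k g == c)) := by
  induction M using List.reverseRecOn with
  | nil => simp
  | append_singleton M x ih =>
    rw [List.foldl_append, List.foldl_cons, List.foldl_nil]
    rw [ih (fun g hg => hM g (List.mem_append_left _ hg))]
    rw [bucket_insert k x cs _ hp
      (by
        intro c hc y hy
        have := (List.mem_filter.mp hy).2
        exact beq_iff_eq.mp this)
      (hM x (by simp))]
    rw [List.flatMap_def, List.flatMap_def]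
    congr 1
    apply List.map_congr_left
    intro c hc
    rw [List.filter_append]
    by_cases hxc : k x = c
    · simp [hxc]
    · simp [hxc]

theorem pairwise_range_desc (a b : Int) : (PySem.List.pyRange a b (-1)).Pairwise (· > ·) := by
  rw [PySem.List.pyRange_neg_one]
  rw [List.pairwise_map]
  exact List.pairwise_lt_range.imp (by intro i j h; omega)

theorem dictA_eq (L : List Int) :
    L.foldl (fun d e => (if d.contains e then d else d.insert e 0).modify e 0 (· + 1))
      PySem.Dict.empty = PySem.Dict.counter L := by
  rw [PySem.Dict.counter_eq_foldl]
  apply PySem.List.foldl_congr_mem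
  intro d e _
  by_cases h : d.contains e
  · rw [if_pos h]
  · rw [if_neg (by simp [h])]
    simp only [PySem.Dict.modify]
    rw [PySem.Dict.getD_insert_self, PySem.Dict.insert_insert_self,
      PySem.Dict.getD_of_not_contains d _ (by simp [h])]

theorem getMsetForm2_eq_sorted (L : List Int) :
    getMsetForm2 L
      = PySem.List.sorted
          ((PySem.Set.ofList L).map (fun e => List.replicate (L.count e) e))
          (fun g => (g.length : Int)) true := by
  unfold getMsetForm2
  rw [dictA_eq]
  simp only [PySem.Dict.keys_counter, PySem.Dict.getD_counter, PySem.List.pyRepeat_singleton,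
    Int.toNat_natCast]

theorem getMsetForm2_spec' (L : List Int) : getMsetForm2 L = getMsetForm2_alt L := by
  rcases eq_or_ne L [] with rfl | hL
  · decide
  · unfold getMsetForm2_alt
    rw [getMsetForm2_eq_sorted]
    rw [PySem.Dict.foldl_insert_getD_add_one_eq_counter]
    -- the guard is false: counter L has items for L ≠ []
    have hS : L.head hL ∈ PySem.Set.ofList L := by
      rw [PySem.Set.mem_ofList]
      exact List.head_mem hL
    have hSne : PySem.Set.ofList L ≠ [] := List.ne_nil_of_mem hS
    have hitems : (PySem.Dict.counter L).items ≠ [] := by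
      rw [PySem.Dict.items_counter]
      simpa using hSne
    rw [if_neg hitems]
    -- name the max
    have hvals : (PySem.Dict.counter L).values
        = (PySem.Set.ofList L).map (fun e => (L.count e : Int)) := by
      simp only [PySem.Dict.values, PySem.Dict.items_counter, List.map_map]
      rfl
    have hvne : (PySem.Dict.counter L).values ≠ [] := by
      rw [hvals]
      simpa using hSne
    obtain ⟨v, vs, hcons⟩ : ∃ v vs, (PySem.Dict.counter L).values = v :: vs := by
      cases hv : (PySem.Dict.counter L).values with
      | nil => exact absurd hv hvne
      | cons v vs => exact ⟨v, vs, rfl⟩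
    obtain ⟨m, hm⟩ : ∃ m, PySem.List.max? (PySem.Dict.counter L).values (fun v => v) = some m := by
      rw [hcons]
      exact ⟨_, PySem.List.max?_id_cons v vs⟩
    rw [hm]
    simp only [Option.getD_some]
    have hmmem : m ∈ (PySem.Dict.counter L).values := PySem.List.max?_mem hm
    have hmax : ∀ v ∈ (PySem.Dict.counter L).values, v ≤ m := by
      intro v hv
      exact PySem.List.max?_isMax hm v hv
    -- buckets: fold over pairs
    simp only [PySem.Dict.keys_counter, PySem.Dict.getD_counter, PySem.List.pyRepeat_singleton,
      Int.toNat_natCast]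
    have hfold :
        (PySem.Set.ofList L).foldl
          (fun b e => b.modify ((L.count e : Int)) [] (· ++ [List.replicate (L.count e) e]))
          PySem.Dict.empty
        = ((PySem.Set.ofList L).map
            (fun e => ((L.count e : Int), List.replicate (L.count e) e))).foldl
            (fun b p => b.modify p.1 [] (· ++ [p.2])) PySem.Dict.empty := by
      rw [List.foldl_map]
    rw [hfold]
    set D : PySem.Dict Int (List (List Int)) :=
      ((PySem.Set.ofList L).map
        (fun e => ((L.count e : Int), List.replicate (L.count e) e))).foldl
        (fun b p => b.modify p.1 [] (· ++ [p.2])) PySem.Dict.empty with hD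
    rw [PySem.List.foldl_append_eq_flatMap (fun c => D.getD c [])
      (PySem.List.pyRange m 0 (-1)) []]
    rw [List.nil_append]
    -- rewrite each bucket lookup as a filter of the group list
    have hbucket : ∀ c : Int,
        D.getD c []
        = ((PySem.Set.ofList L).map (fun e => List.replicate (L.count e) e)).filter
            (fun g => ((g.length : Int)) == c) := by
      intro c
      rw [hD, PySem.Dict.getD_foldl_modify_append]
      rw [PySem.Dict.getD_empty, List.nil_append]
      have hpred : ∀ e ∈ PySem.Set.ofList L,
          ((fun p => p.1 == c) ∘
            (fun e => ((L.count e : Int), List.replicate (L.count e) e))) e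
          = ((fun g => ((g.length : Int)) == c) ∘
            (fun e => List.replicate (L.count e) e)) e := by
        intro e _
        simp
      rw [List.filter_map, List.filter_map, List.filter_congr hpred, List.map_map]
      rfl
    have hflat :
        (PySem.List.pyRange m 0 (-1)).flatMap (fun c => D.getD c [])
        = (PySem.List.pyRange m 0 (-1)).flatMap (fun c =>
            ((PySem.Set.ofList L).map (fun e => List.replicate (L.count e) e)).filter
              (fun g => ((g.length : Int)) == c)) := by
      rw [List.flatMap_def, List.flatMap_def]
      congr 1
      apply List.map_congr_left
      intro c _
      exact hbucket c
    rw [hflat]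
    -- sorted = buckets
    rw [PySem.List.sorted_rev_eq_foldl_insertBy]
    apply foldl_buckets (fun g : List Int => ((g.length : Int))) _ (pairwise_range_desc m 0)
    intro g hg
    rcases List.mem_map.mp hg with ⟨e, he, rfl⟩
    rw [PySem.List.mem_pyRange_neg_one]
    have heL : e ∈ L := by rw [PySem.Set.mem_ofList] at he; exact he
    have hpos : 0 < L.count e := List.count_pos_iff.mpr heL
    have hle : (L.count e : Int) ≤ m := by
      apply hmax
      rw [hvals]
      exact List.mem_map_of_mem he
    constructor
    · simp; omega
    · simpa using hle

-- ===== VERDICT (by name: the statement is the Claim_ definition above) =====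
theorem getMsetForm2_spec : Claim_equal_getMsetForm2 := by
  unfold Claim_equal_getMsetForm2
  intro L _
  unfold Spec_getMsetForm2
  exact getMsetForm2_spec' L
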